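-- pv_equiv track=rewrite | github.com/Vincenzo-Petrolo/Project-1 | circuit.py | __XOR__
-- ===== SOURCE A (Python) =====
-- def __XOR__(inputs_list):
--   if ('X' in inputs_list):
--     return 'X'
--   if  ('U' in inputs_list):
--     return 'U'
--   number_ones = inputs_list.count('1')
--
--   if ("D" in inputs_list or "D'" in inputs_list):
--     # we enter in good/bad simulation
--     # create two lists of inputs, good & bad
--     good_inps = []
--     bad_inps = []
--     for item in inputs_list:
--       if (item == "D"):
--         good_inps.append('1')
--         bad_inps.append('0')
--       elif (item == "D'"):
--         good_inps.append('0')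
--         bad_inps.append('1')
--       else:
--         good_inps.append(item)
--         bad_inps.append(item)
--     # now that we have the two lists
--     # recursive call to the XOR function
--     good_result = __XOR__(good_inps)
--     bad_result = __XOR__(bad_inps)
--
--     # now compare the results to produce the D-algebra result
--     if (good_result == '1' and bad_result == '1'):
--       return '1'
--     elif (good_result == '1' and bad_result == '0'):
--       return 'D'
--     elif (good_result == '0' and bad_result == '1'):
--       return "D'"
--     else:
--       return '0'
--
--   else:
--     # continue with normal simulatio
--     # if the number of ones is even
--     if (number_ones % 2 == 0):
--       return '0'
--     # if the number of ones is odd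
--     return '1'
-- ===== SOURCE B (Python) =====
-- def __XOR__(inputs_list):
--   if ('X' in inputs_list):
--     return 'X'
--   if ('U' in inputs_list):
--     return 'U'
--   good = (inputs_list.count('1') + inputs_list.count('D')) % 2
--   bad = (inputs_list.count('1') + inputs_list.count("D'")) % 2
--   if good == 1 and bad == 1:
--     return '1'
--   if good == 1:
--     return 'D'
--   if bad == 1:
--     return "D'"
--   return '0'
-- ===== Notes on version B (the rewrite author's own statement) =====
-- stated objective: simpler
-- what changed: Replaces the good/bad list-building plus double recursion with a closed-form parity computation on three counts (ones, D, D'), which also subsumes the plain-parity branch.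
import Mathlib
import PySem

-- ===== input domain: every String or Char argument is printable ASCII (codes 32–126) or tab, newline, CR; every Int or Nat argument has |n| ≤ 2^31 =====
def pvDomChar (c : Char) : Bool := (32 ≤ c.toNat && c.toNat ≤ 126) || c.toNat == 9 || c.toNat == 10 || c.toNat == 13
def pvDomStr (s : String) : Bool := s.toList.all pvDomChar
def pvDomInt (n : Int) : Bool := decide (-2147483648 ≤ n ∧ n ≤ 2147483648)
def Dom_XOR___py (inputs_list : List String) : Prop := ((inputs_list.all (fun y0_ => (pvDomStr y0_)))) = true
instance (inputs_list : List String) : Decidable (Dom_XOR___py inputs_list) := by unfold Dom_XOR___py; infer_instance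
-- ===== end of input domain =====

-- B replaces A's good/bad list-building and double recursion by a closed-form parity
-- computation on the counts of '1', 'D' and "D'" (objective: simpler).


-- ===== PORT A =====
-- the per-item transformations of A's good/bad loop
def pvGood (item : String) : String := if item = "D" then "1" else if item = "D'" then "0" else item
def pvBad (item : String) : String := if item = "D" then "0" else if item = "D'" then "1" else item

-- termination helpers for the port's recursion (cited in decreasing_by)
theorem pvGood_count_zero (l : List String) :
    (l.map pvGood).count "D" = 0 ∧ (l.map pvGood).count "D'" = 0 := by
  constructor <;>
  · rw [List.count_eq_zero]
    intro hm
    rcases List.mem_map.mp hm with ⟨x, _, hx⟩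
    simp only [pvGood] at hx; split_ifs at hx <;> simp_all

theorem pvBad_count_zero (l : List String) :
    (l.map pvBad).count "D" = 0 ∧ (l.map pvBad).count "D'" = 0 := by
  constructor <;>
  · rw [List.count_eq_zero]
    intro hm
    rcases List.mem_map.mp hm with ⟨x, _, hx⟩
    simp only [pvBad] at hx; split_ifs at hx <;> simp_all

def XOR___py (inputs_list : List String) : String :=
  if inputs_list.contains "X" then "X"
  else if inputs_list.contains "U" then "U"
  else
    let number_ones := inputs_list.count "1"
    if h : inputs_list.contains "D" || inputs_list.contains "D'" then
      let good_inps := inputs_list.map pvGood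
      let bad_inps := inputs_list.map pvBad
      let good_result := XOR___py good_inps
      let bad_result := XOR___py bad_inps
      if good_result = "1" ∧ bad_result = "1" then "1"
      else if good_result = "1" ∧ bad_result = "0" then "D"
      else if good_result = "0" ∧ bad_result = "1" then "D'"
      else "0"
    else
      if number_ones % 2 = 0 then "0" else "1"
termination_by inputs_list.count "D" + inputs_list.count "D'"
decreasing_by
  · have h1 := pvGood_count_zero inputs_list
    have h2 : 0 < inputs_list.count "D" + inputs_list.count "D'" := by
      rcases Bool.or_eq_true_iff.mp h with h' | h' <;>
        have := List.count_pos_iff.mpr (List.contains_iff_mem.mp h') <;> omega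
    simp only [List.map_subtype, List.unattach_attach]
    omega
  · have h1 := pvBad_count_zero inputs_list
    have h2 : 0 < inputs_list.count "D" + inputs_list.count "D'" := by
      rcases Bool.or_eq_true_iff.mp h with h' | h' <;>
        have := List.count_pos_iff.mpr (List.contains_iff_mem.mp h') <;> omega
    simp only [List.map_subtype, List.unattach_attach]
    omega

-- ===== PORT B =====
def XOR___py_alt (inputs_list : List String) : String :=
  if inputs_list.contains "X" then "X"
  else if inputs_list.contains "U" then "U"
  else
    let good := (inputs_list.count "1" + inputs_list.count "D") % 2
    let bad := (inputs_list.count "1" + inputs_list.count "D'") % 2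
    if good = 1 ∧ bad = 1 then "1"
    else if good = 1 then "D"
    else if bad = 1 then "D'"
    else "0"

-- ===== PRECONDITION & SPEC =====
def Spec_XOR___py (inputs_list : List String) (out : String) : Prop := out = XOR___py_alt inputs_list
instance (inputs_list : List String) (out : String) : Decidable (Spec_XOR___py inputs_list out) := by unfold Spec_XOR___py; infer_instance

-- ===== CLAIM (what is proved, stated in full; the proofs are below) =====
def Claim_equal_XOR___py : Prop := ∀ (inputs_list : List String), Dom_XOR___py inputs_list → Spec_XOR___py inputs_list (XOR___py inputs_list)

-- ===== LEMMAS AND PROOFS =====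

-- the good list has '1' exactly where the input had '1' or 'D'
theorem count_map_pvGood_one (l : List String) :
    (l.map pvGood).count "1" = l.count "1" + l.count "D" := by
  induction l with
  | nil => simp
  | cons x xs ih =>
    simp only [List.map_cons, List.count_cons, ih]
    simp only [pvGood]; split_ifs <;> simp_all <;> omega

theorem count_map_pvBad_one (l : List String) :
    (l.map pvBad).count "1" = l.count "1" + l.count "D'" := by
  induction l with
  | nil => simp
  | cons x xs ih =>
    simp only [List.map_cons, List.count_cons, ih]
    simp only [pvBad]; split_ifs <;> simp_all <;> omega

-- membership of a value the transformation never produces nor consumes is preserved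
theorem mem_map_iff_of (l : List String) (f : String → String) (v : String)
    (hf : ∀ x, f x = v ↔ x = v) : v ∈ l.map f ↔ v ∈ l := by
  simp only [List.mem_map]
  constructor
  · rintro ⟨x, hx, he⟩; exact ((hf x).mp he) ▸ hx
  · intro hv; exact ⟨v, hv, (hf v).mpr rfl⟩

theorem pvGood_fix_X : ∀ x, pvGood x = "X" ↔ x = "X" := by
  intro x; simp only [pvGood]; split_ifs with h1 h2 <;> subst_eqs <;> simp
theorem pvGood_fix_U : ∀ x, pvGood x = "U" ↔ x = "U" := by
  intro x; simp only [pvGood]; split_ifs with h1 h2 <;> subst_eqs <;> simp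
theorem pvBad_fix_X : ∀ x, pvBad x = "X" ↔ x = "X" := by
  intro x; simp only [pvBad]; split_ifs with h1 h2 <;> subst_eqs <;> simp
theorem pvBad_fix_U : ∀ x, pvBad x = "U" ↔ x = "U" := by
  intro x; simp only [pvBad]; split_ifs with h1 h2 <;> subst_eqs <;> simp

-- the non-D/D' branch of A, characterised
theorem XOR_base (l : List String) (hX : "X" ∉ l) (hU : "U" ∉ l)
    (hD : "D" ∉ l) (hD' : "D'" ∉ l) :
    XOR___py l = if l.count "1" % 2 = 0 then "0" else "1" := by
  rw [XOR___py]
  simp [List.contains_iff_mem, hX, hU, hD, hD']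

theorem XOR___py_spec' : ∀ (l : List String), XOR___py l = XOR___py_alt l := by
  intro l
  by_cases hX : "X" ∈ l
  · rw [XOR___py, XOR___py_alt]; simp [List.contains_iff_mem, hX]
  · by_cases hU : "U" ∈ l
    · rw [XOR___py, XOR___py_alt]; simp [List.contains_iff_mem, hX, hU]
    · by_cases hD : "D" ∈ l ∨ "D'" ∈ l
      · -- recursive good/bad branch
        have hXg : "X" ∉ l.map pvGood := fun h => hX ((mem_map_iff_of l pvGood "X" pvGood_fix_X).mp h)
        have hUg : "U" ∉ l.map pvGood := fun h => hU ((mem_map_iff_of l pvGood "U" pvGood_fix_U).mp h)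
        have hXb : "X" ∉ l.map pvBad := fun h => hX ((mem_map_iff_of l pvBad "X" pvBad_fix_X).mp h)
        have hUb : "U" ∉ l.map pvBad := fun h => hU ((mem_map_iff_of l pvBad "U" pvBad_fix_U).mp h)
        have hg := XOR_base (l.map pvGood) hXg hUg
          (List.count_eq_zero.mp (pvGood_count_zero l).1)
          (List.count_eq_zero.mp (pvGood_count_zero l).2)
        have hb := XOR_base (l.map pvBad) hXb hUb
          (List.count_eq_zero.mp (pvBad_count_zero l).1)
          (List.count_eq_zero.mp (pvBad_count_zero l).2)
        rw [count_map_pvGood_one] at hg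
        rw [count_map_pvBad_one] at hb
        rw [XOR___py, XOR___py_alt]
        simp only [List.contains_iff_mem, hX, hU, hD, if_false, if_true,
          decide_true, decide_false, Bool.false_eq_true, dite_true, hg, hb]
        rcases Nat.mod_two_eq_zero_or_one (l.count "1" + l.count "D") with h1 | h1 <;>
          rcases Nat.mod_two_eq_zero_or_one (l.count "1" + l.count "D'") with h2 | h2 <;>
            simp [hD, h1, h2]
      · -- plain parity branch
        rw [not_or] at hD
        obtain ⟨hD, hD'⟩ := hD
        rw [XOR_base l hX hU hD hD', XOR___py_alt]
        have cD : l.count "D" = 0 := List.count_eq_zero.mpr hD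
        have cD' : l.count "D'" = 0 := List.count_eq_zero.mpr hD'
        simp only [List.contains_iff_mem, hX, hU, cD, cD', Nat.add_zero,
          decide_false, Bool.false_eq_true, if_false]
        by_cases h1 : l.count "1" % 2 = 0 <;> simp [h1] <;> omega

-- ===== VERDICT (by name: the statement is the Claim_ definition above) =====
theorem XOR___py_spec : Claim_equal_XOR___py := by
  intro l _
  exact XOR___py_spec' l
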